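/-
  decode_residue's LOOP-INVARIANT VOCABULARY (CONTRACTS decode_residue `defs`; INVARIANTS §6 WA / WB, MBA; DECISIONS D-5, D-15):

      TempRows mem TB C PRD      TB: the temp block after make_block_array: `C` row pointers, then `C` rows of `PRD` 8-byte slots
                                 (USE: `.site_rowptr`, `.site_slot` from `TB.live Live`, the arena layer's `ArenaOK.tblock_live`)
      slot TB C PRD j cs         the address of `part_classdata[j][class_set]`
      Fill mem f r TB C PRD j m  FILL(j, m): the slots `cs < m` of row `j` hold row pointers of `r->classdata` (`RowPtr`)
      WInv … Rows pass cs pcount WA / WB at a `while (pcount < part_read)` head, with the EXACT `pcount = min(class_set·W, part_read)`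
                                 (`Res.WHead`); `Rows` says which rows matter: `rowsA` (row 0) or `rowsB mem dnd ch` (j < ch, ¬DND(j))
      WInnerInv … pass cs i pcount   the invariant of the i-loops (`pcount = class_set·W + i`, the slot `class_set` is filled)
      InterAt mem cp pp ch len   CI: the drift-tolerant position invariant on the two ints `c_inter`, `p_inter` in memory: the pre,
                                 the loop invariant and the POST (result 1) of codebook_decode_deinterleave_repeat
      Residue.factK / factK_buffer / factK_pos   fact K over the record's fields: all offsets ≤ actual_size ≤ 2n ≤ blocksize_1
-/
import Vorbis.ResidueMapping.Temp
namespace Vorbis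
open X86 X86.User Asan

/-! ### TB: the temp block `part_classdata` -/

/-- `row_j = pcd + 8·C + j·(8·part_read)`: the start of row `j` (MBA's closed form with `count = C`, `size = 8·part_read`). -/
def rowBase (TB : Block) (C PRD j : Nat) : Nat := TB.base + 8 * C + j * (8 * PRD)

/-- **`slot(j, cs)`**: the address of `part_classdata[j][class_set]`. -/
def slot (TB : Block) (C PRD j cs : Nat) : Nat := rowBase TB C PRD j + 8 * cs

/-- The slot address written out (for `omega`). -/
theorem slot_def (TB : Block) (C PRD j cs : Nat) : slot TB C PRD j cs = TB.base + 8 * C + j * (8 * PRD) + 8 * cs := id rfl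

/-- **TB, the temp-block ghost** (CONTRACTS decode_residue `defs`; MBA of INVARIANTS §6): the block returned by
`setup_temp_malloc(f, C·(8 + 8·part_read))` after `make_block_array(·, C, 8·part_read)`: `mem64[pcd + 8j] = row_j` for `j < C`.
The block comes back with arbitrary bytes in the rows: which slots hold a row pointer is `Fill`. -/
structure TempRows (mem : Mem) (TB : Block) (C PRD : Nat) : Prop where
  /-- the exact size of the allocation -/
  size : TB.size = C * (8 + 8 * PRD)
  /-- make_block_array's postcondition -/
  rows : ∀ j : Nat, j < C → mem.ptr (TB.base + 8 * j) = rowBase TB C PRD j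

/-- A row ends inside the block. -/
theorem rowBase_end_le (TB : Block) {C PRD j : Nat} (hj : j < C) (hs : TB.size = C * (8 + 8 * PRD)) :
    rowBase TB C PRD j + 8 * PRD ≤ TB.base + TB.size := by
  have h1 : (j + 1) * (8 * PRD) ≤ C * (8 * PRD) := Nat.mul_le_mul_right _ hj
  have h2 : (j + 1) * (8 * PRD) = j * (8 * PRD) + 8 * PRD := Nat.succ_mul _ _
  have h3 : C * (8 + 8 * PRD) = C * 8 + C * (8 * PRD) := Nat.mul_add _ _ _
  unfold rowBase
  omega

/-- A slot lies inside the block, after the row-pointer table. -/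
theorem slot_inside (TB : Block) {C PRD j cs : Nat} (hj : j < C) (hcs : cs < PRD) (hs : TB.size = C * (8 + 8 * PRD)) :
    TB.base + 8 * C ≤ slot TB C PRD j cs ∧ slot TB C PRD j cs + 8 ≤ TB.base + TB.size := by
  have h := rowBase_end_le TB hj hs
  unfold slot
  unfold rowBase at h ⊢
  omega

/-- Two different slots do not overlap. -/
theorem slot_disjoint (TB : Block) {C PRD j cs j' cs' : Nat} (hcs : cs < PRD) (hcs' : cs' < PRD)
    (hne : ¬ (j = j' ∧ cs = cs')) :
    slot TB C PRD j cs + 8 ≤ slot TB C PRD j' cs' ∨ slot TB C PRD j' cs' + 8 ≤ slot TB C PRD j cs := by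
  unfold slot rowBase
  by_cases hj : j = j'
  · subst hj
    omega
  · by_cases hlt : j < j'
    · have h1 : (j + 1) * (8 * PRD) ≤ j' * (8 * PRD) := Nat.mul_le_mul_right _ hlt
      have h2 : (j + 1) * (8 * PRD) = j * (8 * PRD) + 8 * PRD := Nat.succ_mul _ _
      omega
    · have hgt : j' < j := by omega
      have h1 : (j' + 1) * (8 * PRD) ≤ j * (8 * PRD) := Nat.mul_le_mul_right _ hgt
      have h2 : (j' + 1) * (8 * PRD) = j' * (8 * PRD) + 8 * PRD := Nat.succ_mul _ _
      omega

section tb_use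
variable {Live : Nat → Prop} {mem : Mem} {TB : Block} {C PRD : Nat}

/-- **`part_classdata[j]`**, the row pointer (load8 at `pcd + 8j`, `j = 0` on path A, `j < ch ≤ C` on path B). The temp block
is live by the arena layer (`ArenaOK.tblock_live`): it is not one of the permanent blocks of `Blk`, so `hTB` is its liveness. -/
theorem TempRows.site_rowptr (hTB : TB.live Live) (h : TempRows mem TB C PRD) {j : Nat} (hj : j < C) {a : Nat}
    (ha : a = TB.base + 8 * j) : Site Live a 8 := by
  subst ha
  have hs := h.size
  have h3 : C * (8 + 8 * PRD) = C * 8 + C * (8 * PRD) := Nat.mul_add _ _ _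
  apply Site.of_block hTB
  · omega
  · omega
  · omega

/-- **`part_classdata[j][class_set]`** (store8 in pass 0, load8 in the i-loops), in the shape the machine computes it: the row
pointer just loaded plus `8·class_set`. Needs `class_set < part_read` (WA / WB: `Res.WHead.slot`, `Res.WInner.slot`). -/
theorem TempRows.site_slot (hTB : TB.live Live) (h : TempRows mem TB C PRD) {j cs : Nat} (hj : j < C) (hcs : cs < PRD)
    {a : Nat} (ha : a = mem.ptr (TB.base + 8 * j) + 8 * cs) : Site Live a 8 := by
  subst ha
  rw [h.rows j hj]
  have hin := slot_inside TB hj hcs h.size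
  unfold slot at hin
  apply Site.of_block hTB
  · omega
  · omega
  · omega

/-- The machine's slot address is `slot`. -/
theorem TempRows.slot_eq (h : TempRows mem TB C PRD) {j : Nat} (hj : j < C) (cs : Nat) :
    mem.ptr (TB.base + 8 * j) + 8 * cs = slot TB C PRD j cs := by
  rw [h.rows j hj]
  rfl

/-- The row-pointer table is kept by a store into a slot (pass 0's `part_classdata[j][class_set] = …`). -/
theorem TempRows.store_slot (h : TempRows mem TB C PRD) {j cs : Nat} (hj : j < C) (hcs : cs < PRD) (v : Nat)
    (htop : TB.base + TB.size ≤ 2 ^ 64) : TempRows (mem.writeLE (addr (slot TB C PRD j cs)) 8 v) TB C PRD := by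
  have hin := slot_inside TB hj hcs h.size
  have e : (addr (slot TB C PRD j cs)).toNat = slot TB C PRD j cs := toNat_addr _ (by omega)
  refine ⟨h.size, ?_⟩
  intro j' hj'
  rw [← h.rows j' hj']
  apply mem.ptr_writeLE
  · omega
  · omega
  · omega

/-- The row-pointer table is kept when the block's first `8·C` bytes are. -/
theorem TempRows.frame {mem' : Mem} (h : TempRows mem TB C PRD) (hk : (Block.mk TB.base (8 * C)).Kept mem mem') :
    TempRows mem' TB C PRD := by
  refine ⟨h.size, ?_⟩
  intro j hj
  rw [← h.rows j hj]
  exact hk.ptr _ (by simp only []; omega) (by simp only []; omega)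

end tb_use

/-! ### FILL -/

/-- **FILL(j, m)** (INVARIANTS §6 WA / WB): the slots `part_classdata[j][cs]`, `cs < m`, hold a `classdata` row pointer. -/
def Fill (mem : Mem) (f r : Nat) (TB : Block) (C PRD j m : Nat) : Prop :=
  ∀ cs : Nat, cs < m → RowPtr mem f r (mem.ptr (slot TB C PRD j cs))

namespace Fill
variable {mem mem' : Mem} {f r : Nat} {TB : Block} {C PRD j m : Nat}

/-- Nothing is filled at the start of pass 0. -/
theorem zero (mem : Mem) (f r : Nat) (TB : Block) (C PRD j : Nat) : Fill mem f r TB C PRD j 0 := by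
  intro cs hcs
  omega

/-- Fewer slots. -/
theorem mono (h : Fill mem f r TB C PRD j m) {m' : Nat} (hm : m' ≤ m) : Fill mem f r TB C PRD j m' :=
  fun cs hcs => h cs (by omega)

/-- **One more slot** (over an abstract new memory): row pointers stay row pointers, the slots below `m` read as before, the
new slot holds a row pointer. -/
theorem step (h : Fill mem f r TB C PRD j m) (hrow : ∀ v, RowPtr mem f r v → RowPtr mem' f r v)
    (hold : ∀ cs : Nat, cs < m → mem'.ptr (slot TB C PRD j cs) = mem.ptr (slot TB C PRD j cs))
    (hnew : RowPtr mem' f r (mem'.ptr (slot TB C PRD j m))) : Fill mem' f r TB C PRD j (m + 1) := by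
  intro cs hcs
  by_cases e : cs = m
  · rw [e]
    exact hnew
  · rw [hold cs (by omega)]
    exact hrow _ (h cs (by omega))

/-- **Nothing of the row changed**: row pointers stay row pointers and the slots below `m` read as before. -/
theorem keep (h : Fill mem f r TB C PRD j m) (hrow : ∀ v, RowPtr mem f r v → RowPtr mem' f r v)
    (hold : ∀ cs : Nat, cs < m → mem'.ptr (slot TB C PRD j cs) = mem.ptr (slot TB C PRD j cs)) :
    Fill mem' f r TB C PRD j m := by
  intro cs hcs
  rw [hold cs hcs]
  exact hrow _ (h cs hcs)

/-- **FRAME of FILL**: the temp block is kept (the whole of it), and what `RowPtr` reads is the same (`ResidueReads`, with the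
decoder object at `p` before and at `f` after; inside decode_residue `p = f`). -/
theorem frame {p : Nat} (h : Fill mem p r TB C PRD j m) (hj : j < C) (hm : m ≤ PRD) (hs : TB.size = C * (8 + 8 * PRD))
    (hTB : TB.Kept mem mem') (hrd : ResidueReads mem p mem' f r)
    (hcd : (Block.mk (Residue.classdata mem r) (8 * Residue.E mem p r)).Kept mem mem') : Fill mem' f r TB C PRD j m := by
  intro cs hcs
  have hin := slot_inside TB hj (by omega : cs < PRD) hs
  rw [hTB.ptr _ (by omega) (by omega)]
  exact (h cs hcs).frame hrd hcd

/-- **The store of pass 0**, `part_classdata[j][class_set] = r->classdata[q]`, as the walker has it: one more slot of row `j`.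
`v` is the pointer loaded from `classdata[q]`; the store hits neither the record, nor the class book header, nor the
`classdata` table (`hrow`: e.g. `RowPtr.frame` with `Block.Kept.of_writeLE`). -/
theorem store (h : Fill mem f r TB C PRD j m) (hj : j < C) (hm : m < PRD) (hs : TB.size = C * (8 + 8 * PRD))
    (htop : TB.base + TB.size ≤ 2 ^ 64) (v : Nat) (hv : v < 2 ^ 64)
    (hrow : ∀ w, RowPtr mem f r w → RowPtr (mem.writeLE (addr (slot TB C PRD j m)) 8 v) f r w) (hvr : RowPtr mem f r v) :
    Fill (mem.writeLE (addr (slot TB C PRD j m)) 8 v) f r TB C PRD j (m + 1) := by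
  have hin := slot_inside TB hj hm hs
  have e : (addr (slot TB C PRD j m)).toNat = slot TB C PRD j m := toNat_addr _ (by omega)
  apply h.step hrow
  · intro cs hcs
    have hd := slot_disjoint TB (C := C) (j := j) (j' := j) (by omega : cs < PRD) hm (by omega : ¬ (j = j ∧ cs = m))
    have hin' := slot_inside TB hj (by omega : cs < PRD) hs
    apply mem.ptr_writeLE
    · omega
    · omega
    · omega
  · rw [mem.ptr_writeLE_same, Nat.mod_eq_of_lt hv]
    exact hrow v hvr

/-- **The store of pass 0 into ANOTHER row** (path B: the j-loop 2261 fills one row after the other) keeps this row. -/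
theorem store_other (h : Fill mem f r TB C PRD j m) (hj : j < C) (hm : m ≤ PRD) {j' cs' : Nat} (hj' : j' < C) (hcs' : cs' < PRD)
    (hne : j ≠ j') (hs : TB.size = C * (8 + 8 * PRD)) (htop : TB.base + TB.size ≤ 2 ^ 64) (v : Nat)
    (hrow : ∀ w, RowPtr mem f r w → RowPtr (mem.writeLE (addr (slot TB C PRD j' cs')) 8 v) f r w) :
    Fill (mem.writeLE (addr (slot TB C PRD j' cs')) 8 v) f r TB C PRD j m := by
  have hin := slot_inside TB hj' hcs' hs
  have e : (addr (slot TB C PRD j' cs')).toNat = slot TB C PRD j' cs' := toNat_addr _ (by omega)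
  apply h.keep hrow
  intro cs hcs
  have hd := slot_disjoint TB (C := C) (j := j) (j' := j') (by omega : cs < PRD) hcs' (by omega : ¬ (j = j' ∧ cs = cs'))
  have hin' := slot_inside TB hj (by omega : cs < PRD) hs
  apply mem.ptr_writeLE
  · omega
  · omega
  · omega

end Fill

/-! ### WA / WB -/

/-- Path A looks at row 0 only. -/
def rowsA : Nat → Prop := fun j => j = 0

/-- **DND(j)**: `do_not_decode[j] ≠ 0` (`dnd` = the address of the caller's 256-byte array). -/
def DND (mem : Mem) (dnd j : Nat) : Prop := mem.u8 (dnd + j) ≠ 0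

/-- Path B looks at the rows `j < ch` with `do_not_decode[j] = 0`. -/
def rowsB (mem : Mem) (dnd ch : Nat) : Nat → Prop := fun j => j < ch ∧ ¬ DND mem dnd j

/-- **WA / WB at a `while (pcount < part_read)` head** (INVARIANTS §6, DECISIONS D-15). `W = classwords`, `PRD = part_read`.
The exact relation `pcount = min(class_set·W, part_read)`; in pass 0 the rows that matter are filled up to `class_set`, in a
pass ≥ 1 up to `KK = ⌈part_read / W⌉` (pass 0 either finished completely or left through `goto done`). WA: `Rows = rowsA`;
WB: `Rows = rowsB mem dnd ch`. -/
structure WInv (mem : Mem) (f r : Nat) (TB : Block) (C PRD W : Nat) (Rows : Nat → Prop) (pass cs pcount : Nat) : Prop where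
  /-- D-15: `pcount = min(class_set·W, part_read)` -/
  head : Res.WHead W PRD cs pcount
  /-- `class_set ≤ part_read` (every `++class_set` follows a class word that started before the end) -/
  cs_le : cs ≤ PRD
  /-- pass 0: FILL(j, class_set) -/
  fill0 : pass = 0 → ∀ j, Rows j → Fill mem f r TB C PRD j cs
  /-- pass ≥ 1: FILL(j, KK) -/
  fillK : 1 ≤ pass → ∀ j, Rows j → Fill mem f r TB C PRD j (Res.ceilDiv PRD W)

/-- **The invariant of the i-loops** `for (i=0; i < classwords && pcount < part_read; ++i, ++pcount)` (2183, 2229, 2278):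
`pcount = class_set·W + i`, the class word started before the end, and the slot `class_set` of every row that matters is
filled (pass 0: the store just made; pass ≥ 1: it is one of the `KK`). -/
structure WInnerInv (mem : Mem) (f r : Nat) (TB : Block) (C PRD W : Nat) (Rows : Nat → Prop) (pass cs i pcount : Nat) :
    Prop where
  /-- `pcount = class_set·W + i`, `i ≤ W`, `pcount ≤ part_read`, `class_set·W < part_read` -/
  inner : Res.WInner W PRD cs i pcount
  /-- pass 0: FILL(j, class_set + 1) -/
  fill0 : pass = 0 → ∀ j, Rows j → Fill mem f r TB C PRD j (cs + 1)
  /-- pass ≥ 1: FILL(j, KK) -/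
  fillK : 1 ≤ pass → ∀ j, Rows j → Fill mem f r TB C PRD j (Res.ceilDiv PRD W)

namespace WInv
variable {mem : Mem} {f r : Nat} {TB : Block} {C PRD W : Nat} {Rows : Nat → Prop} {pass cs pcount : Nat}

/-- The start of pass 0: `pcount = class_set = 0`, nothing filled. -/
theorem init0 (mem : Mem) (f r : Nat) (TB : Block) (C PRD W : Nat) (Rows : Nat → Prop) :
    WInv mem f r TB C PRD W Rows 0 0 0 :=
  ⟨Res.WHead.init W PRD, by omega, fun _ j _ => Fill.zero mem f r TB C PRD j, fun h => by omega⟩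

/-- The start of a pass ≥ 1: `pcount = class_set = 0`; the rows are filled up to `KK` (from `exit_fill` of the pass before). -/
theorem initK (hp : 1 ≤ pass) (hK : ∀ j, Rows j → Fill mem f r TB C PRD j (Res.ceilDiv PRD W)) :
    WInv mem f r TB C PRD W Rows pass 0 0 :=
  ⟨Res.WHead.init W PRD, by omega, fun h => by omega, fun _ => hK⟩

/-- **The `while` is left** (`pcount ≥ part_read`): every row that matters is filled up to `KK`, whatever the pass: this is
what the next pass starts from (`initK`). Needs R7b. -/
theorem exit_fill (h : WInv mem f r TB C PRD W Rows pass cs pcount) (hW : 1 ≤ W) (hge : PRD ≤ pcount) :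
    ∀ j, Rows j → Fill mem f r TB C PRD j (Res.ceilDiv PRD W) := by
  intro j hj
  by_cases hp : pass = 0
  · exact (h.fill0 hp j hj).mono (h.head.exit hW hge).2
  · exact h.fillK (by omega) j hj

/-- At a head with `pcount < part_read`: the slot index `class_set` is inside the row (`< part_read`): the store of pass 0 and
the loads of the i-loop are inside the temp block (`TempRows.site_slot`). Needs R7b. -/
theorem slot_lt (h : WInv mem f r TB C PRD W Rows pass cs pcount) (hW : 1 ≤ W) (hlt : pcount < PRD) : cs < PRD :=
  (h.head.slot hW hlt).2

/-- **Head → i-loop in a pass ≥ 1**: nothing is stored; the slot `class_set` is one of the `KK`. -/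
theorem enterK (h : WInv mem f r TB C PRD W Rows pass cs pcount) (hp : 1 ≤ pass) (hlt : pcount < PRD) :
    WInnerInv mem f r TB C PRD W Rows pass cs 0 pcount :=
  ⟨h.head.enter hlt, fun h0 => by omega, h.fillK⟩

/-- **Head → i-loop in pass 0**: after the stores of `part_classdata[j][class_set]` for the rows that matter (in the memory
where the stores have been made). -/
theorem enter0 {mem' : Mem} (h : WInv mem f r TB C PRD W Rows 0 cs pcount) (hlt : pcount < PRD)
    (hfill : ∀ j, Rows j → Fill mem' f r TB C PRD j (cs + 1)) : WInnerInv mem' f r TB C PRD W Rows 0 cs 0 pcount :=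
  ⟨h.head.enter hlt, fun _ => hfill, fun h1 => by omega⟩

end WInv

namespace WInnerInv
variable {mem : Mem} {f r : Nat} {TB : Block} {C PRD W : Nat} {Rows : Nat → Prop} {pass cs i pcount : Nat}

/-- **The slot read in the i-loop holds a row pointer**: `c = part_classdata[j][class_set][i]` reads through a `RowPtr`
(`RowPtr.site` for the load1, `RowPtr.class_lt` for `c < classifications`). Needs R7b. -/
theorem rowptr (h : WInnerInv mem f r TB C PRD W Rows pass cs i pcount) (hW : 1 ≤ W) {j : Nat} (hj : Rows j) :
    RowPtr mem f r (mem.ptr (slot TB C PRD j cs)) := by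
  by_cases hp : pass = 0
  · exact h.fill0 hp j hj cs (by omega)
  · exact h.fillK (by omega) j hj cs (h.inner.slot hW).1

/-- The slot index is inside the row. -/
theorem slot_lt (h : WInnerInv mem f r TB C PRD W Rows pass cs i pcount) (hW : 1 ≤ W) : cs < PRD := (h.inner.slot hW).2

/-- One turn of the i-loop. -/
theorem step (h : WInnerInv mem f r TB C PRD W Rows pass cs i pcount) (hi : i < W) (hp : pcount < PRD) :
    WInnerInv mem f r TB C PRD W Rows pass cs (i + 1) (pcount + 1) :=
  ⟨h.inner.step hi hp, h.fill0, h.fillK⟩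

/-- **The i-loop is left, `++class_set`**: WA / WB at the next head. -/
theorem leave (h : WInnerInv mem f r TB C PRD W Rows pass cs i pcount) (hW : 1 ≤ W) (hex : W ≤ i ∨ PRD ≤ pcount) :
    WInv mem f r TB C PRD W Rows pass (cs + 1) pcount := by
  have hs := (h.inner.slot hW).2
  exact ⟨h.inner.leave hex, by omega, h.fill0, h.fillK⟩

/-- The invariant in a new memory where the fills still hold (a callee wrote channel buffers and the bit state). -/
theorem frame {mem' : Mem} {Rows' : Nat → Prop} (h : WInnerInv mem f r TB C PRD W Rows pass cs i pcount)
    (hrows : ∀ j, Rows' j → Rows j)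
    (hfill : ∀ j m, Rows j → Fill mem f r TB C PRD j m → m ≤ PRD → Fill mem' f r TB C PRD j m) (hW : 1 ≤ W) :
    WInnerInv mem' f r TB C PRD W Rows' pass cs i pcount := by
  have hs := h.inner.slot hW
  refine ⟨h.inner, ?_, ?_⟩
  · intro hp j hj
    exact hfill j _ (hrows j hj) (h.fill0 hp j (hrows j hj)) (by omega)
  · intro hp j hj
    exact hfill j _ (hrows j hj) (h.fillK hp j (hrows j hj)) (Res.ceilDiv_le_self hW)

end WInnerInv

/-- WA / WB in a new memory where the fills still hold. -/
theorem WInv.frame {mem mem' : Mem} {f r : Nat} {TB : Block} {C PRD W : Nat} {Rows Rows' : Nat → Prop} {pass cs pcount : Nat}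
    (h : WInv mem f r TB C PRD W Rows pass cs pcount) (hrows : ∀ j, Rows' j → Rows j)
    (hfill : ∀ j m, Rows j → Fill mem f r TB C PRD j m → m ≤ PRD → Fill mem' f r TB C PRD j m) (hW : 1 ≤ W) :
    WInv mem' f r TB C PRD W Rows' pass cs pcount := by
  refine ⟨h.head, h.cs_le, ?_, ?_⟩
  · intro hp j hj
    exact hfill j _ (hrows j hj) (h.fill0 hp j (hrows j hj)) h.cs_le
  · intro hp j hj
    exact hfill j _ (hrows j hj) (h.fillK hp j (hrows j hj)) (Res.ceilDiv_le_self hW)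

/-! ### CI on the two ints in memory -/

/-- **CI in memory**: `c_inter` is the int at `cp`, `p_inter` the int at `pp` (decode_residue's protected-frame objects
`[rbp−0x60, +4)`, `[rbp−0x50, +4)`; in the callee `*c_inter_p`, `*p_inter_p`). `0 ≤ c_inter < ch`, `0 ≤ p_inter`,
`p_inter·ch + c_inter ≤ len·ch`. It is
  * the PRECONDITION of codebook_decode_deinterleave_repeat (with `total_decode ≥ 1`; NOT `pos + total_decode ≤ len·ch`),
  * its loop invariant (on its local copies: `Res.InterOK`), measure `total_decode`, with FIX 10's `effective <= 0 → return 0`,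
  * its POSTCONDITION on a result 1 — what decode_residue needs for the next call inside the same class word (C's gap 8);
    on a result 0 the two ints are NOT written. -/
structure InterAt (mem : Mem) (cp pp ch len : Nat) : Prop where
  c_nonneg : 0 ≤ mem.i32 cp
  p_nonneg : 0 ≤ mem.i32 pp
  ok : Res.InterOK (mem.i32 cp).toNat (mem.i32 pp).toNat ch len

/-- `c_inter < ch` as ints: `outputs + 8·c_inter` is one of the `ch` pointers. -/
theorem InterAt.c_lt {mem : Mem} {cp pp ch len : Nat} (h : InterAt mem cp pp ch len) : mem.i32 cp < ch := by
  have h1 := h.c_nonneg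
  have h2 := h.ok.c_lt
  omega

/-- `p_inter ≤ len ≤ 4096` as ints: no wrap in `p_inter·ch`. -/
theorem InterAt.p_le {mem : Mem} {cp pp ch len : Nat} (h : InterAt mem cp pp ch len) : mem.i32 pp ≤ len := by
  have h1 := h.p_nonneg
  have h2 := h.ok.p_le
  omega

/-- The two ints are unchanged ⇒ CI is (the result-0 case of the callee; any store elsewhere). -/
theorem InterAt.frame {mem mem' : Mem} {cp pp ch len : Nat} (h : InterAt mem cp pp ch len)
    (hc : mem'.i32 cp = mem.i32 cp) (hp : mem'.i32 pp = mem.i32 pp) : InterAt mem' cp pp ch len := by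
  refine ⟨?_, ?_, ?_⟩
  · rw [hc]
    exact h.c_nonneg
  · rw [hp]
    exact h.p_nonneg
  · rw [hc, hp]
    exact h.ok

/-- **decode_residue sets CI** at a `while` head and in the `b < 0` arm: `c_inter = z % ch`, `p_inter = z / ch` stored as ints,
for an offset `z ≤ actual_size ≤ 2·n ≤ n·ch` (fact K; `ch ≥ 2` on path A). `vc`, `vp` are the values read back. -/
theorem InterAt.of_z {mem : Mem} {cp pp ch len z : Nat} (hch : 1 ≤ ch) (hz : z ≤ len * ch)
    (hc : mem.i32 cp = ((z % ch : Nat) : Int)) (hp : mem.i32 pp = ((z / ch : Nat) : Int)) : InterAt mem cp pp ch len := by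
  refine ⟨?_, ?_, ?_⟩
  · rw [hc]
    exact Int.natCast_nonneg _
  · rw [hp]
    exact Int.natCast_nonneg _
  rw [hc, hp, Int.toNat_natCast, Int.toNat_natCast]
  exact Res.InterOK.of_z hch hz

/-! ### Fact K over the record -/

/-- **Fact K** for the record at `r` (R4): with `part_read = PR(r, A)`, every partition `pc < part_read` has
`z(pc) + part_size = begin + pc·part_size + part_size ≤ A`, and `begin ≤ A`, `part_size ≤ A`. -/
theorem Residue.factK {Blk : Block → Prop} {mem : Mem} {f r : Nat} (h : ResidueAtOK Blk mem f r) {A pc : Nat}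
    (hpc : pc < Residue.partRead mem r A) :
    Residue.begin mem r ≤ A ∧ Residue.part_size mem r ≤ A ∧
      Residue.begin mem r + pc * Residue.part_size mem r + Residue.part_size mem r ≤ A := by
  have hk := Res.factK h.R4.1 hpc
  omega

/-- **Fact K for the channel buffer**: with `A = actual_size ≤ 2·n ≤ blocksize_1`, the floats
`target[offset .. offset + part_size)` of the `residue_decode` call are among the first `b1` floats: inside
`Block(residue_buffers[j], 4·b1)` (M6). Also `offset + part_size ≤ 2·n`: residue_decode's `offset + n ≤ 8192`. -/
theorem Residue.factK_buffer {Blk : Block → Prop} {mem : Mem} {f r : Nat} (h : ResidueAtOK Blk mem f r) {rtype n b1 pc : Nat}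
    (hn : 2 * n ≤ b1) (hpc : pc < Residue.partRead mem r (Res.actualDec rtype n)) :
    Residue.begin mem r + pc * Residue.part_size mem r + Residue.part_size mem r ≤ 2 * n ∧
      Residue.begin mem r + pc * Residue.part_size mem r + Residue.part_size mem r ≤ b1 := by
  have hk := Residue.factK h hpc
  have ha := Res.actualDec_le rtype n
  omega

/-- Fact K, the position form for path A: `z(pc) ≤ z(pc) + part_size ≤ 2·n ≤ n·ch` when `rtype = 2`, `ch ≥ 2`. -/
theorem Residue.factK_pos {Blk : Block → Prop} {mem : Mem} {f r : Nat} (h : ResidueAtOK Blk mem f r) {n ch pc : Nat}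
    (hch : 2 ≤ ch) (hpc : pc < Residue.partRead mem r (Res.actualDec 2 n)) :
    Residue.begin mem r + pc * Residue.part_size mem r + Residue.part_size mem r ≤ n * ch := by
  have hk := Residue.factK h hpc
  have ha := Res.actualDec_le 2 n
  exact Res.z_le_len_mul_ch (by omega) hch

end Vorbis
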